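-- pv_equiv track=rewrite | github.com/sulaljuhani/ai_assistant_local_stack | containers/langgraph-agents/tools/event_recurring.py | parse_simple_recurrence
-- ===== SOURCE A (Python) =====
-- from typing import List, Dict, Any, Optional
--
-- def parse_simple_recurrence(recurrence_pattern: str, count: int = 52) -> List[int]:
--     """
--     Parse simple recurrence patterns into day offsets.
--
--     Patterns:
--     - "daily" -> every day
--     - "weekly" -> every 7 days
--     - "weekdays" -> Mon-Fri
--     - "biweekly" -> every 14 days
--     - "monthly" -> every 30 days (approximate)
--
--     Args:
--         recurrence_pattern: Simple pattern string
--         count: Number of occurrences to generate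
--
--     Returns:
--         List of day offsets from start date
--     """
--     pattern = recurrence_pattern.lower()
--
--     if pattern == "daily":
--         return list(range(0, count))
--     elif pattern == "weekly":
--         return [i * 7 for i in range(count)]
--     elif pattern == "weekdays":
--         # Generate weekday occurrences (skip weekends)
--         offsets = []
--         day = 0
--         while len(offsets) < count:
--             # Day 0 is the start, check what day of week it would be
--             # For simplicity, we'll include all and let the date calculation handle it
--             offsets.append(day)
--             day += 1
--             # Skip weekends (very simplified - assumes start is a weekday)
--             if (day % 7) in [5, 6]:  # Sat, Sun (0-indexed from start)
--                 day += 2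
--         return offsets[:count]
--     elif pattern == "biweekly":
--         return [i * 14 for i in range(count)]
--     elif pattern == "monthly":
--         return [i * 30 for i in range(count)]  # Approximate
--     else:
--         # Default to weekly if unknown
--         return [i * 7 for i in range(count)]
-- ===== SOURCE B (Python) =====
-- def parse_simple_recurrence(recurrence_pattern: str, count: int = 52):
--     pattern = recurrence_pattern.lower()
--     if pattern == "weekdays":
--         # closed form: index i falls on day (i//5)*7 + i%5
--         return [(i // 5) * 7 + i % 5 for i in range(count)]
--     step = {"daily": 1, "weekly": 7, "biweekly": 14, "monthly": 30}.get(pattern, 7)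
--     return [i * step for i in range(count)]
-- ===== Notes on version B (the rewrite author's own statement) =====
-- stated objective: simpler
-- what changed: The weekdays while-loop with an accumulator and weekend-skip is replaced by a direct per-index closed form (i//5)*7+i%5, and the remaining fixed-step branches collapse into one comprehension driven by a step looked up in a dict.
import Mathlib
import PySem

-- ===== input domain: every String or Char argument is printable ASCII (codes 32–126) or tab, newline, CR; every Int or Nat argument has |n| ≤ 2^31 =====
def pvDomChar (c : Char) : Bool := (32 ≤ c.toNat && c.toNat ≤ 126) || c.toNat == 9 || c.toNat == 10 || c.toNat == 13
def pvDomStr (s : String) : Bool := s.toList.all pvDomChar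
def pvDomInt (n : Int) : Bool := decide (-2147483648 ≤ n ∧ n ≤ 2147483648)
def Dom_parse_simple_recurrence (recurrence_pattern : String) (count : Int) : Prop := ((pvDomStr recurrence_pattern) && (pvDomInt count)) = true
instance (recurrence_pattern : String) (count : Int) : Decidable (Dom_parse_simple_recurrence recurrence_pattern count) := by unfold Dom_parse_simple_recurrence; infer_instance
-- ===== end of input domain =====

-- B replaces A's weekdays while-loop (accumulate, skip weekends) with the closed form (i//5)*7+i%5
-- and folds the fixed-step branches into one dict-driven comprehension: simpler, same behaviour.


-- ===== PORT A =====
-- the 'weekdays' while-loop: append day, advance, skip Sat/Sun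
def pvWeekdaysLoop (count : Int) (offsets : List Int) (day : Int) : List Int :=
  if (offsets.length : Int) < count then
    let offsets' := offsets ++ [day]
    let day1 := day + 1
    let day2 := if PySem.Int.mod day1 7 = 5 ∨ PySem.Int.mod day1 7 = 6 then day1 + 2 else day1
    pvWeekdaysLoop count offsets' day2
  else offsets
termination_by (count - offsets.length).toNat
decreasing_by simp; omega

def parse_simple_recurrence (recurrence_pattern : String) (count : Int) : List Int :=
  let pattern := PySem.Str.lower recurrence_pattern
  if pattern = "daily" then PySem.List.pyRange 0 count 1
  else if pattern = "weekly" then (PySem.List.pyRange 0 count 1).map (fun i => i * 7)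
  else if pattern = "weekdays" then PySem.List.slice (pvWeekdaysLoop count [] 0) none (some count)
  else if pattern = "biweekly" then (PySem.List.pyRange 0 count 1).map (fun i => i * 14)
  else if pattern = "monthly" then (PySem.List.pyRange 0 count 1).map (fun i => i * 30)
  else (PySem.List.pyRange 0 count 1).map (fun i => i * 7)

-- ===== PORT B =====
def parse_simple_recurrence_alt (recurrence_pattern : String) (count : Int) : List Int :=
  let pattern := PySem.Str.lower recurrence_pattern
  if pattern = "weekdays" then
    (PySem.List.pyRange 0 count 1).map
      (fun i => PySem.Int.floordiv i 5 * 7 + PySem.Int.mod i 5)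
  else
    let step := PySem.Dict.getD
      (PySem.Dict.ofList [("daily", (1 : Int)), ("weekly", 7), ("biweekly", 14), ("monthly", 30)])
      pattern 7
    (PySem.List.pyRange 0 count 1).map (fun i => i * step)

-- ===== PRECONDITION & SPEC =====
def Spec_parse_simple_recurrence (recurrence_pattern : String) (count : Int) (out : List Int) : Prop := out = parse_simple_recurrence_alt recurrence_pattern count
instance (recurrence_pattern : String) (count : Int) (out : List Int) : Decidable (Spec_parse_simple_recurrence recurrence_pattern count out) := by unfold Spec_parse_simple_recurrence; infer_instance

-- ===== CLAIM (what is proved, stated in full; the proofs are below) =====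
def Claim_equal_parse_simple_recurrence : Prop := ∀ (recurrence_pattern : String) (count : Int), Dom_parse_simple_recurrence recurrence_pattern count → Spec_parse_simple_recurrence recurrence_pattern count (parse_simple_recurrence recurrence_pattern count)

-- ===== LEMMAS AND PROOFS =====

-- B's closed form, on Nat indices
def pvG (k : Nat) : Int := ((k / 5 : Nat) : Int) * 7 + ((k % 5 : Nat) : Int)

lemma pvG_step (k : Nat) :
    (if PySem.Int.mod (pvG k + 1) 7 = 5 ∨ PySem.Int.mod (pvG k + 1) 7 = 6
      then pvG k + 1 + 2 else pvG k + 1) = pvG (k + 1) := by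
  have h7 : (0:Int) < 7 := by norm_num
  rw [PySem.Int.mod_eq_emod_of_pos h7]
  unfold pvG
  split_ifs with h
  · omega
  · omega

lemma pvWeekdaysLoop_inv (m : Nat) : ∀ (k : Nat) (count : Int), count = k + m →
    pvWeekdaysLoop count ((List.range k).map pvG) (pvG k) = (List.range (k + m)).map pvG := by
  induction m with
  | zero =>
    intro k count h
    rw [pvWeekdaysLoop]
    simp [h]
  | succ n ih =>
    intro k count h
    rw [pvWeekdaysLoop]
    have hlt : (((List.range k).map pvG).length : Int) < count := by simp; omega
    rw [if_pos hlt]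
    have hacc : (List.range k).map pvG ++ [pvG k] = (List.range (k + 1)).map pvG := by
      simp [List.range_succ]
    simp only [pvG_step, hacc]
    rw [show k + (n + 1) = (k + 1) + n from by omega]
    exact ih (k + 1) count (by omega)

lemma pvWeekdays_eq (count : Int) :
    PySem.List.slice (pvWeekdaysLoop count [] 0) none (some count)
      = (PySem.List.pyRange 0 count 1).map
          (fun i => PySem.Int.floordiv i 5 * 7 + PySem.Int.mod i 5) := by
  by_cases hc : count ≤ 0
  · rw [pvWeekdaysLoop]
    simp [PySem.List.pyRange_one_eq_nil hc, PySem.List.slice, hc]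
  · rw [not_le] at hc
    have key := pvWeekdaysLoop_inv count.toNat 0 count (by omega)
    have hg0 : pvG 0 = 0 := by simp [pvG]
    rw [List.range_zero, List.map_nil, hg0, zero_add] at key
    rw [key, PySem.List.slice_to _ (by omega : (0:Int) ≤ count),
      List.take_of_length_le (by simp), PySem.List.pyRange_one]
    simp only [zero_add, sub_zero, List.map_map]
    apply List.map_congr_left
    intro k _
    simp [pvG]

-- ===== VERDICT (by name: the statement is the Claim_ definition above) =====
theorem parse_simple_recurrence_spec : Claim_equal_parse_simple_recurrence := by
  intro rp count _
  unfold Spec_parse_simple_recurrence parse_simple_recurrence parse_simple_recurrence_alt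
  dsimp only
  generalize PySem.Str.lower rp = p
  by_cases hwd : p = "weekdays"
  · rw [hwd, if_neg (by decide), if_neg (by decide), if_pos rfl, if_pos rfl]
    exact pvWeekdays_eq count
  · have hd :
        PySem.Dict.getD
          (PySem.Dict.ofList [("daily", (1 : Int)), ("weekly", 7), ("biweekly", 14), ("monthly", 30)])
          p 7
        = if p = "daily" then 1 else if p = "weekly" then 7
          else if p = "biweekly" then 14 else if p = "monthly" then 30 else 7 := by
      by_cases e1 : p = "daily"
      · subst e1; decide
      · by_cases e2 : p = "weekly"
        · subst e2; decide
        · by_cases e3 : p = "biweekly"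
          · subst e3; decide
          · by_cases e4 : p = "monthly"
            · subst e4; decide
            · rw [if_neg e1, if_neg e2, if_neg e3, if_neg e4]
              simp only [PySem.Dict.getD, PySem.Dict.get?, PySem.Dict.ofList, PySem.Dict.update,
                PySem.Dict.insert, PySem.Dict.empty, PySem.Dict.contains, List.find?]
              simp [Ne.symm e1, Ne.symm e2, Ne.symm e3, Ne.symm e4]
    rw [if_neg hwd, if_neg hwd, hd]
    by_cases h1 : p = "daily"
    · rw [if_pos h1, if_pos h1]
      simp
    · rw [if_neg h1, if_neg h1]
      by_cases h2 : p = "weekly"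
      · rw [if_pos h2, if_pos h2]
      · rw [if_neg h2, if_neg h2]
        by_cases h3 : p = "biweekly"
        · rw [if_pos h3, if_pos h3]
        · rw [if_neg h3, if_neg h3]
          by_cases h4 : p = "monthly"
          · rw [if_pos h4, if_pos h4]
          · rw [if_neg h4, if_neg h4]
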